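-- pv_equiv track=rewrite | github.com/tortawerter/bucket | dict_keys.py | dict_keys
-- ===== SOURCE A (Python) =====
-- def dict_keys(dict_one, values_dict, new_value):
--     result = []
--     counter = 0
--     for key, value in dict_one.items():
--         if values_dict == value:
--             counter += 1
--             result += key
--             dict_one[key] = new_value
--     return dict_one, counter
-- ===== SOURCE B (Python) =====
-- def dict_keys(dict_one, values_dict, new_value):
--     counter = list(dict_one.values()).count(values_dict)
--     rebuilt = {k: (new_value if v == values_dict else v) for k, v in dict_one.items()}
--     dict_one.clear()
--     dict_one.update(rebuilt)
--     return dict_one, counter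
-- ===== Notes on version B (the rewrite author's own statement) =====
-- stated objective: alternative
-- what changed: Replaces A's fused compare/count/mutate pass (with its dead 'result' accumulator) by counting matches with list(dict_one.values()).count and rebuilding the whole dict with an unconditional comprehension (conditional map over every entry) applied back via clear()/update().
import Mathlib
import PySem

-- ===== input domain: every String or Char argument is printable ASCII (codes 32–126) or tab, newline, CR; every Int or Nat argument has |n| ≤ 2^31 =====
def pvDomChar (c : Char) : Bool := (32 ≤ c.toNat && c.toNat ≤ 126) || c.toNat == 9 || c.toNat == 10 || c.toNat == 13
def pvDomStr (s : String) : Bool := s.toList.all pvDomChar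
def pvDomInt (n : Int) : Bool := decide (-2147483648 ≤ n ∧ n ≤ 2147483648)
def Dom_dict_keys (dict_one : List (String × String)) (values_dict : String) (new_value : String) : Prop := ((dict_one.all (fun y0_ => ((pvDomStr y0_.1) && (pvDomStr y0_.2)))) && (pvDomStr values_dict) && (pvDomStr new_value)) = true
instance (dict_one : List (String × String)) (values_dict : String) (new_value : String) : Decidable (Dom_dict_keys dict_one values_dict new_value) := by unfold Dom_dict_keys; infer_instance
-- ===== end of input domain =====

-- B replaces A's fused compare/count/mutate pass (with its dead 'result' accumulator) by
-- counting via list(values()).count and an unconditional full rebuild of the dict with a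
-- conditional comprehension (alternative decomposition). Both Pythons mutate dict_one in place
-- with the same final contents and order; the equivalence proved here is about the return value.

-- ===== PORT A =====
-- state = (result : List Char, counter : Int, dict); 'result += key' extends by the key's characters.
def dict_keys (dict_one : List (String × String)) (values_dict : String) (new_value : String) : (List (String × String)) × Int :=
  let st := dict_one.foldl
    (fun (st : List Char × Int × PySem.Dict String String) kv =>
      if values_dict == kv.2 then
        (st.1 ++ kv.1.toList, st.2.1 + 1, st.2.2.insert kv.1 new_value)
      else st)
    ([], 0, PySem.Dict.mk dict_one)
  (st.2.2.items, st.2.1)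

-- ===== PORT B =====
def dict_keys_alt (dict_one : List (String × String)) (values_dict : String) (new_value : String) : (List (String × String)) × Int :=
  let counter : Int := PySem.List.count (dict_one.map (·.2)) values_dict
  let rebuilt := PySem.Dict.ofList
    (dict_one.map (fun kv => (kv.1, if kv.2 == values_dict then new_value else kv.2)))
  (rebuilt.items, counter)

-- ===== PRECONDITION & SPEC =====
-- Pre_ excludes association lists with duplicate keys: the Python argument is a dict, which
-- cannot contain a duplicate key, so such lists do not encode any Python input.
def Pre_dict_keys (dict_one : List (String × String)) (values_dict : String) (new_value : String) : Prop :=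
  (dict_one.map Prod.fst).Nodup
instance (dict_one : List (String × String)) (values_dict : String) (new_value : String) : Decidable (Pre_dict_keys dict_one values_dict new_value) := by unfold Pre_dict_keys; infer_instance
def pvWitness_dict_keys : (List (String × String)) × String × String := ([("a", "x"), ("b", "y")], "x", "z")

def Spec_dict_keys (dict_one : List (String × String)) (values_dict : String) (new_value : String) (out : (List (String × String)) × Int) : Prop := out = dict_keys_alt dict_one values_dict new_value
instance (dict_one : List (String × String)) (values_dict : String) (new_value : String) (out : (List (String × String)) × Int) : Decidable (Spec_dict_keys dict_one values_dict new_value out) := by unfold Spec_dict_keys; infer_instance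

-- ===== CLAIM (what is proved, stated in full; the proofs are below) =====
def Claim_equal_dict_keys : Prop := ∀ (dict_one : List (String × String)) (values_dict : String) (new_value : String), Dom_dict_keys dict_one values_dict new_value → Pre_dict_keys dict_one values_dict new_value → Spec_dict_keys dict_one values_dict new_value (dict_keys dict_one values_dict new_value)

-- ===== LEMMAS AND PROOFS =====

-- A's triple-state fold splits into three independent folds.
theorem dict_keys_fold_split (values_dict new_value : String) :
    ∀ (l : List (String × String)) (r : List Char) (c : Int) (d : PySem.Dict String String),
    l.foldl
      (fun (st : List Char × Int × PySem.Dict String String) kv =>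
        if values_dict == kv.2 then
          (st.1 ++ kv.1.toList, st.2.1 + 1, st.2.2.insert kv.1 new_value)
        else st)
      (r, c, d)
    = (l.foldl (fun r kv => if values_dict == kv.2 then r ++ kv.1.toList else r) r,
       l.foldl (fun c kv => if values_dict == kv.2 then c + 1 else c) c,
       l.foldl (fun d kv => if values_dict == kv.2 then d.insert kv.1 new_value else d) d) := by
  intro l
  induction l with
  | nil => intro r c d; rfl
  | cons kv tl ih =>
    intro r c d
    cases hb : (values_dict == kv.2) <;>
      simp only [List.foldl_cons, hb, if_true, if_false, Bool.false_eq_true] <;>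
      [skip; skip] <;> first | exact ih r c d | exact ih (r ++ kv.1.toList) (c + 1) (d.insert kv.1 new_value)

-- replacing the single occurrence of a key in a nodup association list
theorem map_replace_key (pre tl : List (String × String)) (kv : String × String) (nv : String)
    (hpre : kv.1 ∉ pre.map Prod.fst) (htl : kv.1 ∉ tl.map Prod.fst) :
    (pre ++ kv :: tl).map (fun p => if p.1 == kv.1 then (kv.1, nv) else p)
      = pre ++ (kv.1, nv) :: tl := by
  have h1 : pre.map (fun p => if p.1 == kv.1 then (kv.1, nv) else p) = pre := by
    rw [List.map_congr_left (g := id), List.map_id]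
    intro p hp
    have : p.1 ≠ kv.1 := fun h => hpre (h ▸ List.mem_map_of_mem hp)
    simp [this]
  have h2 : tl.map (fun p => if p.1 == kv.1 then (kv.1, nv) else p) = tl := by
    rw [List.map_congr_left (g := id), List.map_id]
    intro p hp
    have : p.1 ≠ kv.1 := fun h => htl (h ▸ List.mem_map_of_mem hp)
    simp [this]
  rw [List.map_append, List.map_cons, h1, h2]
  simp

-- A's conditional in-place update loop over a nodup dict rewrites the items pointwise.
theorem dict_keys_dict_loop (values_dict new_value : String) :
    ∀ (l pre : List (String × String)), ((pre ++ l).map Prod.fst).Nodup →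
      (l.foldl (fun d kv => if values_dict == kv.2 then d.insert kv.1 new_value else d)
        (PySem.Dict.mk (pre ++ l))).items
      = pre ++ l.map (fun kv => (kv.1, if kv.2 == values_dict then new_value else kv.2)) := by
  intro l
  induction l with
  | nil => intro pre _; simp
  | cons kv tl ih =>
    intro pre hnd
    have hnd' : ((pre ++ kv :: tl).map Prod.fst).Nodup := hnd
    rw [List.map_append, List.map_cons] at hnd'
    have hpre : kv.1 ∉ pre.map Prod.fst := by
      intro h
      exact (List.disjoint_of_nodup_append hnd') h (by simp)
    have htl : kv.1 ∉ tl.map Prod.fst := by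
      have := (List.nodup_append.mp hnd').2.1
      simp only [List.nodup_cons] at this
      exact this.1
    rw [List.foldl_cons]
    by_cases h : values_dict = kv.2
    · rw [if_pos (by simp [h])]
      have hc : (PySem.Dict.mk (pre ++ kv :: tl)).contains kv.1 = true := by
        rw [PySem.Dict.contains_mk]
        exact List.any_eq_true.mpr ⟨kv, by simp, by simp⟩
      have hit := PySem.Dict.items_insert_of_contains (PySem.Dict.mk (pre ++ kv :: tl))
        new_value hc
      have hrepl := map_replace_key pre tl kv new_value hpre htl
      have hdict : (PySem.Dict.mk (pre ++ kv :: tl)).insert kv.1 new_value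
          = PySem.Dict.mk ((pre ++ [(kv.1, new_value)]) ++ tl) := by
        apply PySem.Dict.ext
        rw [hit]
        show (pre ++ kv :: tl).map (fun p => if p.1 == kv.1 then (kv.1, new_value) else p) = _
        rw [hrepl]; simp
      rw [hdict, ih (pre ++ [(kv.1, new_value)]) (by simpa using hnd)]
      simp [h.symm]
    · rw [if_neg (by simpa using h)]
      have : (pre ++ kv :: tl) = (pre ++ [kv]) ++ tl := by simp
      rw [this, ih (pre ++ [kv]) (by simpa using hnd)]
      have : kv.2 ≠ values_dict := fun hh => h hh.symm
      simp [this]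

-- ===== VERDICT (by name: the statement is the Claim_ definition above) =====
theorem dict_keys_spec : Claim_equal_dict_keys := by
  intro dict_one values_dict new_value _ hpre
  unfold Spec_dict_keys
  have halt : dict_keys_alt dict_one values_dict new_value
      = ((PySem.Dict.ofList
            (dict_one.map (fun kv => (kv.1, if kv.2 == values_dict then new_value else kv.2)))).items,
         (PySem.List.count (dict_one.map (·.2)) values_dict : Int)) := rfl
  rw [halt]
  unfold dict_keys
  rw [dict_keys_fold_split]
  refine Prod.ext ?_ ?_
  · -- the dict component
    show (dict_one.foldl
        (fun d kv => if values_dict == kv.2 then d.insert kv.1 new_value else d)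
        (PySem.Dict.mk dict_one)).items = _
    rw [show PySem.Dict.mk dict_one = PySem.Dict.mk ([] ++ dict_one) from rfl,
        dict_keys_dict_loop values_dict new_value dict_one [] (by simpa using hpre)]
    -- B's dict(comprehension) over fresh distinct keys appends every pair
    rw [PySem.Dict.ofList, PySem.Dict.update,
        PySem.Dict.items_foldl_insert_fresh _ Prod.fst Prod.snd PySem.Dict.empty
          (fun a _ => by simp) (by simpa [List.map_map, Function.comp_def] using hpre)]
    simp [PySem.Dict.empty, Function.comp_def]
  · -- the counter component
    show dict_one.foldl (fun c kv => if values_dict == kv.2 then c + 1 else c) (0 : Int) = _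
    rw [PySem.List.foldl_if_add_one (fun kv : String × String => values_dict == kv.2)]
    rw [PySem.List.count_eq, List.count_eq_countP, List.countP_map]
    simp only [Function.comp_def, zero_add]
    congr 1
    apply List.countP_congr
    intro kv _
    simp only [beq_iff_eq]
    exact eq_comm
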